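-- pv_equiv track=rewrite | github.com/soniceon/sonice-online-games | src/scripts/scraper.py | get_default_controls
-- ===== SOURCE A (Python) =====
-- def get_default_controls(categories):
--     if any(cat in ['Racing', 'Driving', 'Car'] for cat in categories):
--         return "Use WASD or Arrow keys to drive, Spacebar for handbrake, R to reset car position."
--     elif any(cat in ['Shooting', 'FPS', 'Action'] for cat in categories):
--         return "Use WASD or Arrow keys to move, Mouse to aim and shoot, R to reload."
--     elif any(cat in ['Sports', 'Basketball'] for cat in categories):
--         return "Use Mouse to aim and shoot, Space to jump, WASD or Arrow keys to move."
--     else: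
--         return "Use WASD or Arrow keys to move, Mouse to interact, Space to jump or select."
-- ===== SOURCE B (Python) =====
-- _PRIORITY = {'Racing': 0, 'Driving': 0, 'Car': 0,
--              'Shooting': 1, 'FPS': 1, 'Action': 1,
--              'Sports': 2, 'Basketball': 2}
--
-- _CONTROLS = [
--     "Use WASD or Arrow keys to drive, Spacebar for handbrake, R to reset car position.",
--     "Use WASD or Arrow keys to move, Mouse to aim and shoot, R to reload.",
--     "Use Mouse to aim and shoot, Space to jump, WASD or Arrow keys to move.",
--     "Use WASD or Arrow keys to move, Mouse to interact, Space to jump or select.",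
-- ]
--
-- def get_default_controls(categories):
--     # Single pass: fold the minimum group priority seen (3 = no known group),
--     # then index the controls table by that priority.
--     best = 3
--     for cat in categories:
--         p = _PRIORITY.get(cat, 3)
--         if p < best:
--             best = p
--     return _CONTROLS[best]
-- ===== Notes on version B (the rewrite author's own statement) =====
-- stated objective: faster
-- what changed: Replaced the chain of three any-membership scans by a numeric aggregation: each category is mapped to a group priority through one dict lookup, a single fold keeps the minimum priority seen, and the answer is a table lookup at that priority.
import Mathlib
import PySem

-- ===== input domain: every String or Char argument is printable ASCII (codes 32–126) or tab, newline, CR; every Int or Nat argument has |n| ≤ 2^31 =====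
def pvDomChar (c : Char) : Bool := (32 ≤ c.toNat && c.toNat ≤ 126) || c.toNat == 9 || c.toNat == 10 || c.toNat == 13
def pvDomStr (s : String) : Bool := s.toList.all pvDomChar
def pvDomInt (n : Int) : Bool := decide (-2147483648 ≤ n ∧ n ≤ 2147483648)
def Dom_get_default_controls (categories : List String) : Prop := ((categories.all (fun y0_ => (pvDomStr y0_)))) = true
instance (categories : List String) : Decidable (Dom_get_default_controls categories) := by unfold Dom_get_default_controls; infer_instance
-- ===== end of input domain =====

-- B replaces the chain of any-membership scans by a single pass folding the minimum
-- group priority (one dict lookup per category) followed by a table lookup (objective: faster).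
-- ===== PORT A =====
def get_default_controls (categories : List String) : String :=
  if categories.any (fun cat => (["Racing", "Driving", "Car"] : List String).contains cat) then
    "Use WASD or Arrow keys to drive, Spacebar for handbrake, R to reset car position."
  else if categories.any (fun cat => (["Shooting", "FPS", "Action"] : List String).contains cat) then
    "Use WASD or Arrow keys to move, Mouse to aim and shoot, R to reload."
  else if categories.any (fun cat => (["Sports", "Basketball"] : List String).contains cat) then
    "Use Mouse to aim and shoot, Space to jump, WASD or Arrow keys to move."
  else
    "Use WASD or Arrow keys to move, Mouse to interact, Space to jump or select."

-- ===== PORT B =====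
-- _PRIORITY: category -> group priority
def pvPriority : PySem.Dict String Int :=
  PySem.Dict.ofList
    [("Racing", 0), ("Driving", 0), ("Car", 0),
     ("Shooting", 1), ("FPS", 1), ("Action", 1),
     ("Sports", 2), ("Basketball", 2)]

-- _CONTROLS: controls string per priority
def pvControls : List String :=
  [ "Use WASD or Arrow keys to drive, Spacebar for handbrake, R to reset car position.",
    "Use WASD or Arrow keys to move, Mouse to aim and shoot, R to reload.",
    "Use Mouse to aim and shoot, Space to jump, WASD or Arrow keys to move.",
    "Use WASD or Arrow keys to move, Mouse to interact, Space to jump or select." ]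

-- the for-loop: fold the minimum priority seen, starting from 3
-- _CONTROLS[best]: best is always in 0..3, so the index never raises; pyGetD's default is unreachable
def get_default_controls_alt (categories : List String) : String :=
  let best := categories.foldl
    (fun b cat =>
      let p := pvPriority.getD cat 3
      if p < b then p else b) 3
  PySem.List.pyGetD pvControls best ""

-- ===== PRECONDITION & SPEC =====
def Spec_get_default_controls (categories : List String) (out : String) : Prop := out = get_default_controls_alt categories
instance (categories : List String) (out : String) : Decidable (Spec_get_default_controls categories out) := by unfold Spec_get_default_controls; infer_instance

-- ===== CLAIM (what is proved, stated in full; the proofs are below) =====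
def Claim_equal_get_default_controls : Prop := ∀ (categories : List String), Dom_get_default_controls categories → Spec_get_default_controls categories (get_default_controls categories)

-- ===== LEMMAS AND PROOFS =====

-- the dict lookup, characterized by group membership
lemma prio_spec (c : String) :
    pvPriority.getD c 3 =
      (if (["Racing", "Driving", "Car"] : List String).contains c then 0
       else if (["Shooting", "FPS", "Action"] : List String).contains c then 1
       else if (["Sports", "Basketball"] : List String).contains c then 2
       else 3 : Int) := by
  simp only [pvPriority, PySem.Dict.ofList, PySem.Dict.update, List.foldl_cons, List.foldl_nil,
    PySem.Dict.getD_insert, PySem.Dict.getD_empty, List.contains_eq_mem, List.mem_cons,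
    List.not_mem_nil, or_false, decide_eq_true_eq]
  split_ifs <;> simp_all

-- the fold, characterized: minimum of b and the least group priority present
set_option maxHeartbeats 2000000 in
lemma fold_spec (cs : List String) (b : Int) :
    cs.foldl (fun b cat => let p := pvPriority.getD cat 3; if p < b then p else b) b =
      (if cs.any (fun c => (["Racing", "Driving", "Car"] : List String).contains c) then min b 0
       else if cs.any (fun c => (["Shooting", "FPS", "Action"] : List String).contains c) then min b 1
       else if cs.any (fun c => (["Sports", "Basketball"] : List String).contains c) then min b 2
       else if cs = [] then b else min b 3) := by
  induction cs generalizing b with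
  | nil => simp
  | cons c cs ih =>
    rw [List.foldl_cons, ih]
    simp only [List.any_cons, Bool.or_eq_true, prio_spec, List.cons_ne_nil]
    split_ifs <;> first | omega | tauto

-- ===== VERDICT (by name: the statement is the Claim_ definition above) =====
theorem get_default_controls_spec : Claim_equal_get_default_controls := by
  intro cs _
  simp only [Spec_get_default_controls, get_default_controls, get_default_controls_alt, fold_spec]
  split_ifs <;> rfl
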